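-- pv_equiv track=rewrite | github.com/leh60245/study-programmers | code12973.py | solution
-- ===== SOURCE A (Python) =====
-- def solution(s):
--     stack = []
--     for i in range(len(s)):
--         if stack != [] and stack[-1] == s[i]:
--             stack.pop()
--             continue
--         stack.append(s[i])
--     return 1 if stack == [] else 0
-- ===== SOURCE B (Python) =====
-- def _reduce_once(s):
--     """Return s with the first adjacent equal pair removed, or None if none exists."""
--     for i in range(len(s) - 1):
--         if s[i] == s[i + 1]:
--             return s[:i] + s[i + 2:]
--     return None
--
-- def solution(s):
--     while True:
--         t = _reduce_once(s)
--         if t is None: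
--             break
--         s = t
--     return 1 if s == "" else 0
-- ===== Notes on version B (the rewrite author's own statement) =====
-- stated objective: alternative
-- what changed: Replaced the single-pass stack simulation by naive repeated reduction: scan for the first adjacent equal pair, delete it, and repeat until no pair remains; relies on confluence of pair removal.
import Mathlib
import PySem

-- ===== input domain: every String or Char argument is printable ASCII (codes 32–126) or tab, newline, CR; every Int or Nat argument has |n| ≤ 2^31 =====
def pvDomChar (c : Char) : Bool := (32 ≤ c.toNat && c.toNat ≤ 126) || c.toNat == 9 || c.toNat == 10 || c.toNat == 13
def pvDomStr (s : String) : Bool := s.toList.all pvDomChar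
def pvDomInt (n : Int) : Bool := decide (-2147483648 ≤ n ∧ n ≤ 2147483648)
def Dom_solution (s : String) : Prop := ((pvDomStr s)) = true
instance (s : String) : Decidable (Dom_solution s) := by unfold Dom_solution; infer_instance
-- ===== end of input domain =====

-- B replaces A's single-pass stack simulation by naive repeated removal of the
-- first adjacent equal pair until none remains (alternative algorithm, not faster).


-- ===== PORT A =====
-- one loop iteration of A: stack grows at the tail (Python append), stack[-1] = getLast?
def aStep (stack : List Char) (c : Char) : List Char :=
  if stack ≠ [] ∧ stack.getLast? = some c then stack.dropLast else stack ++ [c]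

def solution (s : String) : Int :=
  if s.toList.foldl aStep [] = [] then 1 else 0

-- ===== PORT B =====
-- Source B's _reduce_once: remove the first adjacent equal pair, none if irreducible
def reduceOnce : List Char → Option (List Char)
  | [] => none
  | [_] => none
  | c :: d :: t => if c = d then some t else (reduceOnce (d :: t)).map (c :: ·)

theorem reduceOnce_length : ∀ {l l' : List Char}, reduceOnce l = some l' → l'.length < l.length := by
  intro l
  induction l with
  | nil => intro l' h; simp [reduceOnce] at h
  | cons c t ih =>
    intro l' h
    match t with
    | [] => simp [reduceOnce] at h
    | d :: t' =>
      simp only [reduceOnce] at h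
      split at h
      · cases h; simp
      · simp only [Option.map_eq_some_iff] at h
        obtain ⟨m, hm, rfl⟩ := h
        have := ih hm
        simpa using Nat.succ_lt_succ this

-- Source B's while loop
def bLoop (l : List Char) : List Char :=
  match h : reduceOnce l with
  | some l' => bLoop l'
  | none => l
termination_by l.length
decreasing_by exact reduceOnce_length h

def solution_alt (s : String) : Int :=
  if bLoop s.toList = [] then 1 else 0

-- ===== PRECONDITION & SPEC =====
def Spec_solution (s : String) (out : Int) : Prop := out = solution_alt s
instance (s : String) (out : Int) : Decidable (Spec_solution s out) := by unfold Spec_solution; infer_instance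

-- ===== CLAIM (what is proved, stated in full; the proofs are below) =====
def Claim_equal_solution : Prop := ∀ (s : String), Dom_solution s → Spec_solution s (solution s)

-- ===== LEMMAS AND PROOFS =====

-- the stack A maintains never holds two equal adjacent characters
def Irr (l : List Char) : Prop := List.IsChain (· ≠ ·) l

theorem irr_aStep {st : List Char} (c : Char) (h : Irr st) : Irr (aStep st c) := by
  unfold aStep
  split
  · rename_i hc
    exact h.prefix st.dropLast_prefix
  · rename_i hc
    refine List.isChain_append.2 ⟨h, by simp, ?_⟩
    intro x hx y hy
    simp only [List.head?_cons, Option.mem_some_iff] at hy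
    subst hy
    intro hxc
    subst hxc
    exact hc ⟨by rintro rfl; simp at hx, hx⟩

theorem irr_foldl {st : List Char} (l : List Char) (h : Irr st) :
    Irr (l.foldl aStep st) := by
  induction l generalizing st with
  | nil => exact h
  | cons c t ih => exact ih (irr_aStep c h)

-- pushing the same character twice cancels on an irreducible stack
theorem aStep_aStep {st : List Char} (c : Char) (h : Irr st) :
    aStep (aStep st c) c = st := by
  unfold aStep
  split
  · rename_i hc
    obtain ⟨hne, hlast⟩ := hc
    obtain ⟨t, rfl⟩ := List.getLast?_eq_some_iff.1 hlast
    simp only [List.dropLast_concat]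
    rcases ht : t.getLast? with _ | x
    · simp [List.getLast?_eq_none_iff.1 ht]
    · have hx : x ≠ c := by
        have := (List.isChain_append.1 h).2.2
        simpa [ht] using this
      rw [if_neg]
      rintro ⟨-, h2⟩
      exact hx (by simpa using h2)
  · rw [if_pos ⟨by simp, by simp⟩]
    simp

-- removing an adjacent pair anywhere does not change A's final stack
theorem foldl_remove_pair (u v : List Char) (c : Char) :
    (u ++ c :: c :: v).foldl aStep [] = (u ++ v).foldl aStep [] := by
  have h1 : Irr (u.foldl aStep []) := irr_foldl u (by simp [Irr])
  simp only [List.foldl_append, List.foldl_cons]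
  rw [aStep_aStep c h1]

-- reduceOnce's success case decomposes the list
theorem reduceOnce_some : ∀ {l l' : List Char}, reduceOnce l = some l' →
    ∃ u v c, l = u ++ c :: c :: v ∧ l' = u ++ v := by
  intro l
  induction l with
  | nil => intro l' h; simp [reduceOnce] at h
  | cons c t ih =>
    intro l' h
    match t with
    | [] => simp [reduceOnce] at h
    | d :: t' =>
      simp only [reduceOnce] at h
      split at h
      · rename_i hcd
        subst hcd
        cases h
        exact ⟨[], l', c, by simp⟩
      · simp only [Option.map_eq_some_iff] at h
        obtain ⟨m, hm, rfl⟩ := h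
        obtain ⟨u, v, e, hl, hm'⟩ := ih hm
        exact ⟨c :: u, v, e, by simp [hl], by simp [hm']⟩

-- reduceOnce fails exactly on irreducible lists
theorem reduceOnce_none : ∀ {l : List Char}, reduceOnce l = none → Irr l := by
  intro l
  induction l with
  | nil => intro _; simp [Irr]
  | cons c t ih =>
    intro h
    match t with
    | [] => simp [Irr]
    | d :: t' =>
      simp only [reduceOnce] at h
      split at h
      · simp at h
      · rename_i hcd
        simp only [Option.map_eq_none_iff] at h
        exact List.isChain_cons_cons.2 ⟨hcd, ih h⟩

-- A's stack run leaves an irreducible list unchanged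
theorem foldl_irr : ∀ {l : List Char}, Irr l → l.foldl aStep [] = l := by
  intro l
  induction l using List.reverseRecOn with
  | nil => simp
  | append_singleton t c ih =>
    intro h
    have ht : Irr t := h.prefix ⟨[c], rfl⟩
    rw [List.foldl_append, ih ht]
    show aStep t c = t ++ [c]
    unfold aStep
    rcases ht' : t.getLast? with _ | x
    · rw [if_neg]; rintro ⟨-, h2⟩; exact absurd h2 (by simp)
    · have hx : x ≠ c := by
        have := (List.isChain_append.1 h).2.2
        simpa [ht'] using this
      rw [if_neg]
      rintro ⟨-, h2⟩
      exact hx (by simpa using h2)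

-- main invariant: A's stack of l equals B's fully reduced form of l
theorem foldl_eq_bLoop_aux : ∀ (n : Nat) (l : List Char), l.length ≤ n →
    l.foldl aStep [] = bLoop l := by
  intro n
  induction n with
  | zero =>
    intro l hl
    have : l = [] := List.eq_nil_of_length_eq_zero (Nat.le_zero.1 hl)
    subst this
    rw [bLoop]
    simp [reduceOnce]
  | succ n ih =>
    intro l hl
    rw [bLoop]
    split
    · rename_i l' h
      obtain ⟨u, v, c, rfl, rfl⟩ := reduceOnce_some h
      rw [foldl_remove_pair]
      refine ih (u ++ v) ?_
      simp at hl ⊢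
      omega
    · rename_i h
      exact foldl_irr (reduceOnce_none h)

theorem foldl_eq_bLoop (l : List Char) : l.foldl aStep [] = bLoop l :=
  foldl_eq_bLoop_aux l.length l le_rfl

-- ===== VERDICT (by name: the statement is the Claim_ definition above) =====
theorem solution_spec : Claim_equal_solution := by
  intro s _
  unfold Spec_solution solution solution_alt
  rw [foldl_eq_bLoop]
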